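-- pv_equiv track=rewrite | github.com/daniel-reich/ubiquitous-fiesta | G2QnBrxvpq9FacFuo_11.py | possible_path
-- ===== SOURCE A (Python) =====
-- def possible_path(lst):
--   prev = ''
--   for step in lst:
--     s = 'h' if step == 'H' else 'r'
--     if s == prev:
--       return False
--     prev = s
--   return True
-- ===== SOURCE B (Python) =====
-- def possible_path(lst):
--   if not lst:
--     return True
--   first = lst[0] == 'H'
--   return all((x == 'H') == (first ^ (i % 2 == 1)) for i, x in enumerate(lst))
-- ===== Notes on version B (the rewrite author's own statement) =====
-- stated objective: alternative
-- what changed: Replaces the stateful prev-accumulator loop with early return by a positional closed-form check: every element's type (x == 'H') must equal the first element's type XOR its index parity, so no neighbour comparison or carried state is needed.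
import Mathlib
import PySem

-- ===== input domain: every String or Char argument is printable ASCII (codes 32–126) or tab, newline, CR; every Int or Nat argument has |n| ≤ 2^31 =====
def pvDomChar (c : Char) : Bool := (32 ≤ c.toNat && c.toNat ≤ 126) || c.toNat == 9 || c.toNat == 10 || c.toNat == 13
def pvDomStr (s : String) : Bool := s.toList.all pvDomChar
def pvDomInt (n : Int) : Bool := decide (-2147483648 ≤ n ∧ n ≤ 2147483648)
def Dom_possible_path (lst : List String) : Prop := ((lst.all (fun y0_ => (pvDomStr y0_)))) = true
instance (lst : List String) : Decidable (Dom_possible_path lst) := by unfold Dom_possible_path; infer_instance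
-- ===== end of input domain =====

-- B replaces A's stateful prev-accumulator loop by a positional check: each element's type equals the first's type XOR its index parity (alternative decomposition, same cost).


-- ===== PORT A =====
-- the loop carrying prev, with early return False
def possible_path_go (prev : String) : List String → Bool
  | [] => true
  | step :: rest =>
    let s := if step = "H" then "h" else "r"
    if s = prev then false else possible_path_go s rest

def possible_path (lst : List String) : Bool := possible_path_go "" lst

-- ===== PORT B =====
-- if not lst: return True; first = lst[0] == 'H';
-- all((x == 'H') == (first ^ (i % 2 == 1)) for i, x in enumerate(lst))
def possible_path_alt (lst : List String) : Bool :=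
  match lst with
  | [] => true
  | x :: _ =>
    let first := x == "H"
    (lst.zipIdx).all (fun p => ((p.1 == "H") == (first ^^ decide (p.2 % 2 = 1))))

-- ===== PRECONDITION & SPEC =====
def Spec_possible_path (lst : List String) (out : Bool) : Prop := out = possible_path_alt lst
instance (lst : List String) (out : Bool) : Decidable (Spec_possible_path lst out) := by unfold Spec_possible_path; infer_instance

-- ===== CLAIM (what is proved, stated in full; the proofs are below) =====
def Claim_equal_possible_path : Prop := ∀ (lst : List String), Dom_possible_path lst → Spec_possible_path lst (possible_path lst)

-- ===== LEMMAS AND PROOFS =====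
-- A's loop, resumed after an element of type b at index k-1, equals B's parity check on the
-- remaining elements indexed from k, provided b is the type B expects at an index of k's opposite parity.
set_option maxRecDepth 4096 in
theorem possible_path_go_parity (rest : List String) :
    ∀ (b f : Bool) (k : Nat), b = (f ^^ decide (k % 2 = 0)) →
    possible_path_go (if b then "h" else "r") rest
      = (rest.zipIdx k).all (fun p => ((p.1 == "H") == (f ^^ decide (p.2 % 2 = 1)))) := by
  induction rest with
  | nil => intros; simp [possible_path_go]
  | cons y rest ih =>
    intro b f k hb
    have hs : (if y = "H" then "h" else "r") = (if (y == "H") then "h" else "r") := by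
      by_cases h : y = "H" <;> simp [h]
    have hk : ((k + 1) % 2 = 0) ↔ ¬ (k % 2 = 0) := by omega
    have hk1 : (k % 2 = 1) ↔ ¬ (k % 2 = 0) := by omega
    simp only [possible_path_go, List.zipIdx_cons, List.all_cons, hs]
    by_cases hy : (y == "H") = b
    · -- same type as previous: A returns false, B's conjunct at index k is false
      have : ((if (y == "H") then "h" else "r") = (if b then "h" else "r")) := by rw [hy]
      rw [if_pos this]
      have : ((y == "H") == (f ^^ decide (k % 2 = 1))) = false := by
        subst hb; rw [hy]
        rcases Nat.mod_two_eq_zero_or_one k with h | h <;> cases f <;> simp [h]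
      simp only [this, Bool.false_and]
    · -- different type: recurse with b' = (y == "H") at index k+1
      have hne : ((if (y == "H") then "h" else "r") ≠ (if b then "h" else "r")) := by
        clear ih hs hk hk1 hb
        cases hyy : (y == "H") <;> cases hbb : b <;> simp_all
      rw [if_neg hne]
      have hb' : (y == "H") = (f ^^ decide ((k + 1) % 2 = 0)) := by
        clear ih hs hk hk1
        subst hb
        cases hyy : (y == "H") <;> cases f <;>
          rcases Nat.mod_two_eq_zero_or_one k with h | h <;>
            simp_all <;> omega
      have hcj : ((y == "H") == (f ^^ decide (k % 2 = 1))) = true := by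
        clear ih hs hk hk1
        subst hb
        cases hyy : (y == "H") <;> cases f <;>
          rcases Nat.mod_two_eq_zero_or_one k with h | h <;> simp_all
      rw [ih (y == "H") f (k + 1) hb', hcj]
      simp

-- ===== VERDICT (by name: the statement is the Claim_ definition above) =====
theorem possible_path_spec : Claim_equal_possible_path := by
  intro lst _
  unfold Spec_possible_path possible_path
  cases lst with
  | nil => simp [possible_path_go, possible_path_alt]
  | cons x rest =>
    have hs : (if x = "H" then "h" else "r") = (if (x == "H") then "h" else "r") := by
      by_cases h : x = "H" <;> simp [h]
    have h0 : possible_path_go "" (x :: rest)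
        = possible_path_go (if (x == "H") then "h" else "r") rest := by
      simp only [possible_path_go, hs]
      have : (if (x == "H") then "h" else "r") ≠ "" := by cases (x == "H") <;> simp
      rw [if_neg this]
    rw [h0, possible_path_go_parity rest (x == "H") (x == "H") 1 (by simp)]
    simp [possible_path_alt, List.zipIdx_cons]
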